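-- pv_equiv track=rewrite | github.com/mjlaali/ner-exercise | best_model/ner_dataset.py | build_category
-- ===== SOURCE A (Python) =====
-- import collections
-- import itertools
--
-- def build_category(tags):
--     counts = collections.Counter(itertools.chain(*tags))
--     dictionary = dict()
--     for tag in counts:
--         dictionary[tag] = len(dictionary) + 1   # +1, 0 is reserved for padding
--     reverse_dictionary = dict(zip(dictionary.values(), dictionary.keys()))
--
--     Y_train = list()
--     for a_seq in tags:
--         y_train = []
--         for tag in a_seq:
--             y_train.append(dictionary[tag])
--         Y_train.append(y_train)
--
--     return Y_train, dictionary, reverse_dictionary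
-- ===== SOURCE B (Python) =====
-- def build_category(tags):
--     dictionary = {}
--     Y_train = []
--     for a_seq in tags:
--         y_train = []
--         for tag in a_seq:
--             if tag not in dictionary:
--                 dictionary[tag] = len(dictionary) + 1   # +1, 0 is reserved for padding
--             y_train.append(dictionary[tag])
--         Y_train.append(y_train)
--     reverse_dictionary = {v: k for k, v in dictionary.items()}
--     return Y_train, dictionary, reverse_dictionary
-- ===== Notes on version B (the rewrite author's own statement) =====
-- stated objective: simpler
-- what changed: A's three separate traversals (Counter over the flattened tags, a loop assigning indices over the Counter's keys, then a nested encoding loop) are fused into one single pass that assigns each tag its index lazily on first sight while encoding, with the reverse dictionary read off the finished dictionary.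
import Mathlib
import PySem

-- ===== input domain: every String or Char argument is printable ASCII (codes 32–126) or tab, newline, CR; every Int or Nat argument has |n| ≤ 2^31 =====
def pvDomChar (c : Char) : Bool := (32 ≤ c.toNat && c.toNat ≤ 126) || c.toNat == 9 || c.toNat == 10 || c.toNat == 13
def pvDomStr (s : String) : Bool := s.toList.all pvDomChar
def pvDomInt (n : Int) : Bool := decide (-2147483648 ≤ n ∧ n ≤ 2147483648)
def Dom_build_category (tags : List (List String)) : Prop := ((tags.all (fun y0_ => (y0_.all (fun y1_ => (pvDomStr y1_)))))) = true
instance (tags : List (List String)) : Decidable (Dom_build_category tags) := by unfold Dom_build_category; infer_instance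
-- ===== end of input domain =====

-- B fuses A's three separate traversals (Counter, index-assignment loop, encoding loop)
-- into one pass that assigns an index to each tag on first sight (objective: simpler).

-- ===== PORT A =====
-- dictionary[tag] is ported as getD tag 0: every tag of tags is a key of counts and hence of
-- dictionary, so the Python lookup never raises and the default 0 is never used (A is total).
def build_category (tags : List (List String)) : List (List Int) × (List (String × Int)) × (List (Int × String)) :=
  let counts : PySem.Dict String Int := PySem.Dict.counter tags.flatten
  let dictionary : PySem.Dict String Int :=
    counts.keys.foldl (fun d tag => d.insert tag ((d.size : Int) + 1)) PySem.Dict.empty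
  let reverse_dictionary : PySem.Dict Int String :=
    PySem.Dict.ofList (dictionary.values.zip dictionary.keys)
  let Y_train : List (List Int) :=
    tags.foldl (fun Y a_seq =>
      Y ++ [a_seq.foldl (fun y tag => y ++ [dictionary.getD tag 0]) []]) []
  (Y_train, dictionary.items, reverse_dictionary.items)

-- ===== PORT B =====
-- the inner loop body: assign an index on first sight, then emit the tag's index
def bcInner (st : PySem.Dict String Int × List Int) (tag : String) :
    PySem.Dict String Int × List Int :=
  let d := if st.1.contains tag then st.1 else st.1.insert tag ((st.1.size : Int) + 1)
  (d, st.2 ++ [d.getD tag 0])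

-- the outer loop body: encode one sequence, threading the dictionary through
def bcOuter (st : PySem.Dict String Int × List (List Int)) (a_seq : List String) :
    PySem.Dict String Int × List (List Int) :=
  let r := a_seq.foldl bcInner (st.1, [])
  (r.1, st.2 ++ [r.2])

def build_category_alt (tags : List (List String)) : List (List Int) × (List (String × Int)) × (List (Int × String)) :=
  let st := tags.foldl bcOuter (PySem.Dict.empty, [])
  let reverse_dictionary : PySem.Dict Int String :=
    PySem.Dict.ofList (st.1.items.map (fun p => (p.2, p.1)))
  (st.2, st.1.items, reverse_dictionary.items)

-- ===== PRECONDITION & SPEC =====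
def Spec_build_category (tags : List (List String)) (out : List (List Int) × (List (String × Int)) × (List (Int × String))) : Prop := out = build_category_alt tags
instance (tags : List (List String)) (out : List (List Int) × (List (String × Int)) × (List (Int × String))) : Decidable (Spec_build_category tags out) := by unfold Spec_build_category; infer_instance

-- ===== CLAIM (what is proved, stated in full; the proofs are below) =====
def Claim_equal_build_category : Prop := ∀ (tags : List (List String)), Dom_build_category tags → Spec_build_category tags (build_category tags)

-- ===== LEMMAS AND PROOFS =====

-- B's dictionary step, and its fold over a flat list of tags
def bcStep (d : PySem.Dict String Int) (t : String) : PySem.Dict String Int :=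
  if d.contains t then d else d.insert t ((d.size : Int) + 1)

def bcF (l : List String) (d : PySem.Dict String Int) : PySem.Dict String Int :=
  l.foldl bcStep d

-- the keys of a list not yet in seen, in order of first appearance
def newKeys (seen : List String) : List String → List String
  | [] => []
  | t :: ts => if seen.contains t then newKeys seen ts else t :: newKeys (seen ++ [t]) ts

-- the canonical items list: keys paired with consecutive indices from n
def mkD : List String → Int → List (String × Int)
  | [], _ => []
  | k :: ks, n => (k, n) :: mkD ks (n + 1)

lemma mkD_nil (n : Int) : mkD [] n = [] := rfl

lemma mkD_cons (k : String) (ks : List String) (n : Int) :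
    mkD (k :: ks) n = (k, n) :: mkD ks (n + 1) := rfl

lemma dict_contains_eq_keys_contains (d : PySem.Dict String Int) (t : String) :
    d.contains t = d.keys.contains t := by
  rw [Bool.eq_iff_iff]
  simp [PySem.Dict.contains, PySem.Dict.keys, List.any_eq_true, List.mem_map]

lemma set_update_eq_append_newKeys (l seen : List String) :
    PySem.Set.update seen l = seen ++ newKeys seen l := by
  induction l generalizing seen with
  | nil => simp [PySem.Set.update, newKeys]
  | cons t ts ih =>
    by_cases h : t ∈ seen
    · simpa [PySem.Set.update, PySem.Set.add, newKeys, h] using ih seen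
    · simpa [PySem.Set.update, PySem.Set.add, newKeys, h] using ih (seen ++ [t])

lemma newKeys_nil_eq_ofList (l : List String) :
    newKeys [] l = PySem.Set.ofList l := by
  have := set_update_eq_append_newKeys l []
  simpa [PySem.Set.ofList, PySem.Set.update, PySem.Set.empty] using this.symm

-- A's dictionary loop over fresh distinct keys yields the canonical items list
lemma foldl_insert_eq_mkD (ks : List String) (d : PySem.Dict String Int)
    (hnd : ks.Nodup) (hfr : ∀ k ∈ ks, d.contains k = false) :
    ks.foldl (fun d tag => d.insert tag ((d.size : Int) + 1)) d =
      PySem.Dict.mk (d.items ++ mkD ks ((d.size : Int) + 1)) := by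
  induction ks generalizing d with
  | nil => apply PySem.Dict.ext; simp [mkD_nil]
  | cons k ks ih =>
    have hk : d.contains k = false := hfr k (List.mem_cons_self)
    have hitems := PySem.Dict.items_insert_of_not_contains d ((d.size : Int) + 1) hk
    have hsize : (d.insert k ((d.size : Int) + 1)).size = d.size + 1 := by
      rw [PySem.Dict.size_insert]; simp [hk]
    have hfr' : ∀ k' ∈ ks, (d.insert k ((d.size : Int) + 1)).contains k' = false := by
      intro k' hk'
      rw [PySem.Dict.contains_insert]
      have hne : k' ≠ k := by rintro rfl; exact (List.nodup_cons.mp hnd).1 hk'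
      simp [hne, hfr k' (List.mem_cons_of_mem _ hk')]
    rw [List.foldl_cons, ih _ (List.nodup_cons.mp hnd).2 hfr']
    apply PySem.Dict.ext
    simp [hitems, hsize, mkD_cons]

-- B's first-sight dictionary loop yields the same canonical items list
lemma bcF_eq_mkD (l : List String) (d : PySem.Dict String Int) :
    bcF l d = PySem.Dict.mk (d.items ++ mkD (newKeys d.keys l) ((d.size : Int) + 1)) := by
  induction l generalizing d with
  | nil => simp [bcF, newKeys, mkD]
  | cons t ts ih =>
    by_cases h : d.contains t
    · have hstep : bcStep d t = d := by simp [bcStep, h]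
      have hkc : d.keys.contains t = true := by rw [← dict_contains_eq_keys_contains]; exact h
      simp only [bcF, List.foldl_cons, hstep, newKeys, hkc, if_pos]
      exact ih d
    · have hb : d.contains t = false := by simpa using h
      have hkc : d.keys.contains t = false := by rw [← dict_contains_eq_keys_contains]; exact hb
      have hstep : bcStep d t = d.insert t ((d.size : Int) + 1) := by simp [bcStep, hb]
      have hitems := PySem.Dict.items_insert_of_not_contains d ((d.size : Int) + 1) hb
      have hkeys := PySem.Dict.keys_insert_of_not_contains d ((d.size : Int) + 1) hb
      have hsize : (d.insert t ((d.size : Int) + 1)).size = d.size + 1 := by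
        rw [PySem.Dict.size_insert]; simp [hb]
      simp only [bcF, List.foldl_cons, hstep, newKeys, hkc]
      rw [show (ts.foldl bcStep (d.insert t ((d.size : Int) + 1)))
            = bcF ts (d.insert t ((d.size : Int) + 1)) from rfl,
          ih (d.insert t ((d.size : Int) + 1))]
      apply PySem.Dict.ext
      simp only [hitems, hkeys, hsize, List.append_assoc, List.singleton_append,
        Bool.false_eq_true, if_false, mkD_cons]
      push_cast
      ring_nf

-- values of keys already present persist through B's dictionary loop
lemma bcF_get?_of_contains (l : List String) (d : PySem.Dict String Int) (k : String)
    (h : d.contains k = true) : (bcF l d).get? k = d.get? k := by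
  induction l generalizing d with
  | nil => rfl
  | cons t ts ih =>
    by_cases ht : d.contains t
    · have : bcStep d t = d := by simp [bcStep, ht]
      simpa [bcF, this] using ih d h
    · have hb : d.contains t = false := by simpa using ht
      have hne : k ≠ t := by rintro rfl; rw [h] at hb; exact absurd hb (by simp)
      have hstep : bcStep d t = d.insert t ((d.size : Int) + 1) := by simp [bcStep, hb]
      have hc : (d.insert t ((d.size : Int) + 1)).contains k = true := by
        rw [PySem.Dict.contains_insert]; simp [h]
      have := ih (d.insert t ((d.size : Int) + 1)) hc
      simp only [bcF, List.foldl_cons, hstep] at *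
      rw [this, PySem.Dict.get?_insert_of_ne d _ hne]

lemma bcF_getD_of_contains (l : List String) (d : PySem.Dict String Int) (k : String)
    (h : d.contains k = true) : (bcF l d).getD k 0 = d.getD k 0 := by
  rw [PySem.Dict.getD_eq_get?_getD, PySem.Dict.getD_eq_get?_getD, bcF_get?_of_contains l d k h]

lemma bcStep_contains_self (d : PySem.Dict String Int) (t : String) :
    (bcStep d t).contains t = true := by
  by_cases h : d.contains t
  · simp [bcStep, h]
  · have hb : d.contains t = false := by simpa using h
    simp [bcStep, hb, PySem.Dict.contains_insert_self]

lemma bcF_contains_of_contains (l : List String) (d : PySem.Dict String Int) (k : String)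
    (h : d.contains k = true) : (bcF l d).contains k = true := by
  induction l generalizing d with
  | nil => exact h
  | cons t ts ih =>
    have hs : (bcStep d t).contains k = true := by
      by_cases ht : d.contains t
      · simpa [bcStep, ht] using h
      · have hb : d.contains t = false := by simpa using ht
        simp [bcStep, hb, PySem.Dict.contains_insert, h]
    simpa [bcF] using ih (bcStep d t) hs

lemma bcF_contains_of_mem (l : List String) (d : PySem.Dict String Int) (k : String)
    (h : k ∈ l) : (bcF l d).contains k = true := by
  induction l generalizing d with
  | nil => cases h
  | cons t ts ih =>
    rcases List.mem_cons.mp h with rfl | hm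
    · exact bcF_contains_of_contains ts _ k (bcStep_contains_self d k)
    · exact ih (bcStep d t) hm

-- B's inner loop: the dictionary advances by bcF, and every emitted index is the
-- final (post-sequence) dictionary's value of that tag
lemma inner_spec (seq : List String) (d : PySem.Dict String Int) (y : List Int) :
    seq.foldl bcInner (d, y) =
      (bcF seq d, y ++ seq.map (fun t => (bcF seq d).getD t 0)) := by
  induction seq generalizing d y with
  | nil => simp [bcF]
  | cons t ts ih =>
    have hfst : bcInner (d, y) t = (bcStep d t, y ++ [(bcStep d t).getD t 0]) := by
      simp [bcInner, bcStep]
    have hpersist : (bcF ts (bcStep d t)).getD t 0 = (bcStep d t).getD t 0 :=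
      bcF_getD_of_contains ts (bcStep d t) t (bcStep_contains_self d t)
    calc (t :: ts).foldl bcInner (d, y)
        = ts.foldl bcInner (bcStep d t, y ++ [(bcStep d t).getD t 0]) := by
          rw [List.foldl_cons, hfst]
      _ = (bcF ts (bcStep d t),
            (y ++ [(bcStep d t).getD t 0]) ++ ts.map (fun t' => (bcF ts (bcStep d t)).getD t' 0)) :=
          ih _ _
      _ = (bcF (t :: ts) d, y ++ (t :: ts).map (fun t' => (bcF (t :: ts) d).getD t' 0)) := by
          have hF : bcF (t :: ts) d = bcF ts (bcStep d t) := rfl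
          rw [hF, List.map_cons, hpersist]
          simp

-- B's outer loop: the dictionary is bcF of the flattened input, and every emitted
-- index is the final dictionary's value of that tag
lemma outer_spec (rest : List (List String)) (d : PySem.Dict String Int)
    (Y : List (List Int)) :
    rest.foldl bcOuter (d, Y) =
      (bcF rest.flatten d,
        Y ++ rest.map (fun seq => seq.map (fun t => (bcF rest.flatten d).getD t 0))) := by
  induction rest generalizing d Y with
  | nil => simp [bcF]
  | cons seq rest' ih =>
    have hstep : bcOuter (d, Y) seq
        = (bcF seq d, Y ++ [seq.map (fun t => (bcF seq d).getD t 0)]) := by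
      simp [bcOuter, inner_spec seq d []]
    have hflat : bcF (List.flatten (seq :: rest')) d = bcF rest'.flatten (bcF seq d) := by
      simp [bcF, List.flatten_cons, List.foldl_append]
    have hmap : seq.map (fun t => (bcF seq d).getD t 0)
        = seq.map (fun t => (bcF rest'.flatten (bcF seq d)).getD t 0) := by
      apply List.map_congr_left
      intro t ht
      exact (bcF_getD_of_contains rest'.flatten (bcF seq d) t
        (bcF_contains_of_mem seq d t ht)).symm
    calc (seq :: rest').foldl bcOuter (d, Y)
        = rest'.foldl bcOuter (bcF seq d, Y ++ [seq.map (fun t => (bcF seq d).getD t 0)]) := by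
          rw [List.foldl_cons, hstep]
      _ = (bcF rest'.flatten (bcF seq d),
            (Y ++ [seq.map (fun t => (bcF seq d).getD t 0)])
              ++ rest'.map (fun s => s.map (fun t => (bcF rest'.flatten (bcF seq d)).getD t 0))) :=
          ih _ _
      _ = _ := by
          rw [hflat, List.map_cons, ← hmap]
          simp

-- A's dictionary equals B's dictionary
lemma dict_eq (flat : List String) :
    (PySem.Dict.counter flat).keys.foldl
        (fun d tag => d.insert tag ((d.size : Int) + 1)) PySem.Dict.empty
      = bcF flat PySem.Dict.empty := by
  rw [PySem.Dict.keys_counter,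
      foldl_insert_eq_mkD _ _ (PySem.Set.nodup_ofList _) (fun k _ => PySem.Dict.contains_empty k),
      bcF_eq_mkD, show PySem.Dict.empty.keys = ([] : List String) from rfl,
      newKeys_nil_eq_ofList]

-- ===== VERDICT (by name: the statement is the Claim_ definition above) =====
theorem build_category_spec : Claim_equal_build_category := by
  intro tags _
  unfold Spec_build_category
  simp only [build_category, build_category_alt]
  rw [dict_eq tags.flatten, outer_spec]
  refine congrArg₂ Prod.mk ?_ (congrArg₂ Prod.mk rfl ?_)
  · simp only [PySem.List.foldl_append_singleton_eq_map, List.nil_append]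
  · congr 1
    rw [show (bcF tags.flatten PySem.Dict.empty).values
          = (bcF tags.flatten PySem.Dict.empty).items.map (fun x => x.2) from rfl,
        show (bcF tags.flatten PySem.Dict.empty).keys
          = (bcF tags.flatten PySem.Dict.empty).items.map (fun x => x.1) from rfl,
        List.zip_map']
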